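-- pv_equiv track=rewrite | github.com/Pollyceno/DescricaoEntropica | DescricaoEntropica/tripartido/grupo.py | ind322
-- ===== SOURCE A (Python) =====
-- def ind322(a,b,c,x,y,z):
--     # Behavior indices for 322 Bell scenario
--     i=0
--     for K1 in range(2):
--         for K0 in range(2):
--             for J1 in range(2):
--                 for J0 in range(2):
--                     for I1 in range(2):
--                         for I0 in range(2):
--                             if K1==z and K0==c and J1==y and J0==b and I1==x and I0==a :
--                                 return i
--                             else :
--                                 i=i+1
-- ===== SOURCE B (Python) =====
-- def ind322(a, b, c, x, y, z):
--     # Closed-form mixed-radix index instead of six nested search loops.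
--     if not all(v == 0 or v == 1 for v in (a, b, c, x, y, z)):
--         return None
--     return (a == 1) + 2*(x == 1) + 4*(b == 1) + 8*(y == 1) + 16*(c == 1) + 32*(z == 1)
-- ===== Notes on version B (the rewrite author's own statement) =====
-- stated objective: simpler
-- what changed: Replaces the six nested enumeration loops (a linear search over all 64 tuples) with a validity check plus a direct mixed-radix closed-form index.
import Mathlib
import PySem

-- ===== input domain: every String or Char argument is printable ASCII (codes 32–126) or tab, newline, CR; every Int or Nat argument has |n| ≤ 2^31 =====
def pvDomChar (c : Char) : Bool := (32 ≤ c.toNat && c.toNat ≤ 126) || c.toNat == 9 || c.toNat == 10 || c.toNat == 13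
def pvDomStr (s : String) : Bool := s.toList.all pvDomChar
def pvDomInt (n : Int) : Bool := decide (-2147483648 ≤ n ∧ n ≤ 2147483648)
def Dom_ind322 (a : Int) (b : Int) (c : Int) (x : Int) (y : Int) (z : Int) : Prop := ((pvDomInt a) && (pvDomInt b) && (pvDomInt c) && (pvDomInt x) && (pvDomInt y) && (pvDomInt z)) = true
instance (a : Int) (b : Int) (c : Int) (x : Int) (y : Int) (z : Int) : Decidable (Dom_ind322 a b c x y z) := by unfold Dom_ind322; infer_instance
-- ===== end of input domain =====

set_option maxHeartbeats 1600000

-- B replaces A's six nested enumeration loops with a validity check and a closed-form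
-- mixed-radix index (objective: simpler).

-- ===== PORT A =====
-- A walks all 64 tuples (K1,K0,J1,J0,I1,I0) in nested-loop order with a counter i,
-- returning i at the first match; falling off the loops is Python's implicit None.
-- The loop body (the if/else with the counter and early return):
def ind322Step (a : Int) (b : Int) (c : Int) (x : Int) (y : Int) (z : Int)
    (st : Option Int × Int) (t : Int × Int × Int × Int × Int × Int) : Option Int × Int :=
  match st with
  | (some r, i) => (some r, i)
  | (none, i) =>
    if t.1 = z ∧ t.2.1 = c ∧ t.2.2.1 = y ∧ t.2.2.2.1 = b ∧ t.2.2.2.2.1 = x ∧ t.2.2.2.2.2 = a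
    then (some i, i) else (none, i + 1)

-- the six nested 'for … in range(2)' loops as nested flatMaps in the same order
def ind322Tuples : List (Int × Int × Int × Int × Int × Int) :=
  (PySem.List.pyRange 0 2 1).flatMap fun K1 =>
  (PySem.List.pyRange 0 2 1).flatMap fun K0 =>
  (PySem.List.pyRange 0 2 1).flatMap fun J1 =>
  (PySem.List.pyRange 0 2 1).flatMap fun J0 =>
  (PySem.List.pyRange 0 2 1).flatMap fun I1 =>
  (PySem.List.pyRange 0 2 1).map fun I0 => (K1, K0, J1, J0, I1, I0)

def ind322 (a : Int) (b : Int) (c : Int) (x : Int) (y : Int) (z : Int) : Option Int :=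
  (ind322Tuples.foldl (ind322Step a b c x y z) (none, 0)).1

-- ===== PORT B =====
def ind322_alt (a : Int) (b : Int) (c : Int) (x : Int) (y : Int) (z : Int) : Option Int :=
  if (a = 0 ∨ a = 1) ∧ (b = 0 ∨ b = 1) ∧ (c = 0 ∨ c = 1) ∧
     (x = 0 ∨ x = 1) ∧ (y = 0 ∨ y = 1) ∧ (z = 0 ∨ z = 1) then
    some ((if a = 1 then 1 else 0) + 2 * (if x = 1 then 1 else 0) +
          4 * (if b = 1 then 1 else 0) + 8 * (if y = 1 then 1 else 0) +
          16 * (if c = 1 then 1 else 0) + 32 * (if z = 1 then 1 else 0))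
  else none

-- ===== PRECONDITION & SPEC =====
def Spec_ind322 (a : Int) (b : Int) (c : Int) (x : Int) (y : Int) (z : Int) (out : Option Int) : Prop := out = ind322_alt a b c x y z
instance (a : Int) (b : Int) (c : Int) (x : Int) (y : Int) (z : Int) (out : Option Int) : Decidable (Spec_ind322 a b c x y z out) := by unfold Spec_ind322; infer_instance

-- ===== CLAIM (what is proved, stated in full; the proofs are below) =====
def Claim_equal_ind322 : Prop := ∀ (a : Int) (b : Int) (c : Int) (x : Int) (y : Int) (z : Int), Dom_ind322 a b c x y z → Spec_ind322 a b c x y z (ind322 a b c x y z)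

-- ===== LEMMAS AND PROOFS =====

-- A's loop returns None when no tuple in the remaining list matches
theorem fold_none (a b c x y z : Int) (l : List (Int × Int × Int × Int × Int × Int)) (i : Int)
    (h : ∀ t ∈ l, ¬(t.1 = z ∧ t.2.1 = c ∧ t.2.2.1 = y ∧ t.2.2.2.1 = b ∧ t.2.2.2.2.1 = x ∧ t.2.2.2.2.2 = a)) :
    (l.foldl (ind322Step a b c x y z) (none, i)).1 = none := by
  induction l generalizing i with
  | nil => rfl
  | cons hd tl ih =>
    have hhd := h hd (List.mem_cons_self ..)
    simp only [List.foldl_cons, ind322Step, if_neg hhd]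
    exact ih _ fun t ht => h t (List.mem_cons_of_mem _ ht)

-- every enumerated tuple is binary in every component
theorem tuples_binary : ∀ u ∈ ind322Tuples,
    (u.1 = 0 ∨ u.1 = 1) ∧ (u.2.1 = 0 ∨ u.2.1 = 1) ∧ (u.2.2.1 = 0 ∨ u.2.2.1 = 1) ∧
    (u.2.2.2.1 = 0 ∨ u.2.2.2.1 = 1) ∧ (u.2.2.2.2.1 = 0 ∨ u.2.2.2.2.1 = 1) ∧
    (u.2.2.2.2.2 = 0 ∨ u.2.2.2.2.2 = 1) := by decide

-- if any argument is non-binary, both programs return none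
theorem both_none {a b c x y z v : Int} (h0 : v ≠ 0) (h1 : v ≠ 1)
    (hv : v = a ∨ v = b ∨ v = c ∨ v = x ∨ v = y ∨ v = z) :
    ind322 a b c x y z = ind322_alt a b c x y z := by
  have hA : ind322 a b c x y z = none := by
    apply fold_none
    intro t ht hc
    obtain ⟨c1, c2, c3, c4, c5, c6⟩ := tuples_binary t ht
    rcases hv with rfl | rfl | rfl | rfl | rfl | rfl
    · rcases c6 with h | h
      · exact h0 (hc.2.2.2.2.2 ▸ h)
      · exact h1 (hc.2.2.2.2.2 ▸ h)
    · rcases c4 with h | h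
      · exact h0 (hc.2.2.2.1 ▸ h)
      · exact h1 (hc.2.2.2.1 ▸ h)
    · rcases c2 with h | h
      · exact h0 (hc.2.1 ▸ h)
      · exact h1 (hc.2.1 ▸ h)
    · rcases c5 with h | h
      · exact h0 (hc.2.2.2.2.1 ▸ h)
      · exact h1 (hc.2.2.2.2.1 ▸ h)
    · rcases c3 with h | h
      · exact h0 (hc.2.2.1 ▸ h)
      · exact h1 (hc.2.2.1 ▸ h)
    · rcases c1 with h | h
      · exact h0 (hc.1 ▸ h)
      · exact h1 (hc.1 ▸ h)
  have hB : ind322_alt a b c x y z = none := by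
    have hneg : ¬((a = 0 ∨ a = 1) ∧ (b = 0 ∨ b = 1) ∧ (c = 0 ∨ c = 1) ∧
        (x = 0 ∨ x = 1) ∧ (y = 0 ∨ y = 1) ∧ (z = 0 ∨ z = 1)) := by
      rcases hv with rfl | rfl | rfl | rfl | rfl | rfl
      · exact fun hcon => hcon.1.elim h0 h1
      · exact fun hcon => hcon.2.1.elim h0 h1
      · exact fun hcon => hcon.2.2.1.elim h0 h1
      · exact fun hcon => hcon.2.2.2.1.elim h0 h1
      · exact fun hcon => hcon.2.2.2.2.1.elim h0 h1
      · exact fun hcon => hcon.2.2.2.2.2.elim h0 h1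
    rw [ind322_alt, if_neg hneg]
  rw [hA, hB]

-- on binary arguments the two programs agree (finite check)
theorem good : ∀ a ∈ [(0:Int), 1], ∀ b ∈ [(0:Int), 1], ∀ c ∈ [(0:Int), 1],
    ∀ x ∈ [(0:Int), 1], ∀ y ∈ [(0:Int), 1], ∀ z ∈ [(0:Int), 1],
    ind322 a b c x y z = ind322_alt a b c x y z := by decide

-- ===== VERDICT (by name: the statement is the Claim_ definition above) =====
theorem ind322_spec : Claim_equal_ind322 := by
  intro a b c x y z _
  unfold Spec_ind322
  by_cases h : (a = 0 ∨ a = 1) ∧ (b = 0 ∨ b = 1) ∧ (c = 0 ∨ c = 1) ∧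
      (x = 0 ∨ x = 1) ∧ (y = 0 ∨ y = 1) ∧ (z = 0 ∨ z = 1)
  · obtain ⟨ha, hb, hc, hx, hy, hz⟩ := h
    exact good a (by rcases ha with rfl | rfl <;> decide)
      b (by rcases hb with rfl | rfl <;> decide)
      c (by rcases hc with rfl | rfl <;> decide)
      x (by rcases hx with rfl | rfl <;> decide)
      y (by rcases hy with rfl | rfl <;> decide)
      z (by rcases hz with rfl | rfl <;> decide)
  · have : (a ≠ 0 ∧ a ≠ 1) ∨ (b ≠ 0 ∧ b ≠ 1) ∨ (c ≠ 0 ∧ c ≠ 1) ∨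
        (x ≠ 0 ∧ x ≠ 1) ∨ (y ≠ 0 ∧ y ≠ 1) ∨ (z ≠ 0 ∧ z ≠ 1) := by tauto
    rcases this with ⟨h0, h1⟩ | ⟨h0, h1⟩ | ⟨h0, h1⟩ | ⟨h0, h1⟩ | ⟨h0, h1⟩ | ⟨h0, h1⟩
    · exact both_none h0 h1 (Or.inl rfl)
    · exact both_none h0 h1 (Or.inr (Or.inl rfl))
    · exact both_none h0 h1 (Or.inr (Or.inr (Or.inl rfl)))
    · exact both_none h0 h1 (Or.inr (Or.inr (Or.inr (Or.inl rfl))))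
    · exact both_none h0 h1 (Or.inr (Or.inr (Or.inr (Or.inr (Or.inl rfl)))))
    · exact both_none h0 h1 (Or.inr (Or.inr (Or.inr (Or.inr (Or.inr rfl)))))
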